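-- pv_equiv track=rewrite | github.com/OmarAdellll/ETL | app/etl/autoComplete/ai_complete.py | _flexible_match
-- ===== SOURCE A (Python) =====
-- def _flexible_match(text: str, partial: str) -> bool:
--     """More flexible matching - FIXED"""
--     if not partial:
--         return True
--
--     text_lower = text.lower()
--     partial_lower = partial.lower()
--
--     # Direct matches
--     if text_lower.startswith(partial_lower):
--         return True
--
--     if partial_lower in text_lower:
--         return True
--
--     # Word boundary match
--     words = text_lower.split()
--     for word in words:
--         if word.startswith(partial_lower):
--             return True
--
--     # Match with underscores (e.g., "temp" matches "temperature_2m")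
--     if '_' in text_lower:
--         parts = text_lower.split('_')
--         for part in parts:
--             if part.startswith(partial_lower):
--                 return True
--
--     # Abbreviation match (e.g., "prec" matches "precipitation")
--     if len(partial_lower) >= 3:
--         if text_lower.startswith(partial_lower[:3]):
--             return True
--
--     return False
-- ===== SOURCE B (Python) =====
-- def _flexible_match(text: str, partial: str) -> bool:
--     """Same result as A: every word/underscore-prefix branch is subsumed by the
--     substring test, so one boolean expression suffices (empty partial is a
--     substring of everything)."""
--     tl = text.lower()
--     pl = partial.lower()
--     return pl in tl or (len(pl) >= 3 and tl.startswith(pl[:3]))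
-- ===== Notes on version B (the rewrite author's own statement) =====
-- stated objective: simpler
-- what changed: B replaces A's five-branch chain with its two split-and-scan loops by a single boolean expression (substring test plus the 3-char abbreviation test), since every prefix/word/underscore-part branch is subsumed by the substring test; no splitting or looping remains.
import Mathlib
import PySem

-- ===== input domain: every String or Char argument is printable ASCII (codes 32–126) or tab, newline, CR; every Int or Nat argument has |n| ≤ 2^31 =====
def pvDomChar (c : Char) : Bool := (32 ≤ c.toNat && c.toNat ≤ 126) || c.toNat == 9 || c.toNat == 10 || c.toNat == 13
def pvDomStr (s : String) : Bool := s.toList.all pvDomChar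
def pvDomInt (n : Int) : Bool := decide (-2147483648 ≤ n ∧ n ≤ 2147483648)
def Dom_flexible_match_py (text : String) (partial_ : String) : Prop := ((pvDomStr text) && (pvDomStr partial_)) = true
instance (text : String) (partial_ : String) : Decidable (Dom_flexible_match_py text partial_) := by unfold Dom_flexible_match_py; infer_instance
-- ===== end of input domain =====

-- B collapses A's word/underscore loops (all subsumed by the substring test) into one
-- boolean expression: simpler, no splitting or looping; same result on every input.

-- ===== PORT A =====
def flexible_match_py (text : String) (partial_ : String) : Bool :=
  if PySem.Str.len partial_ == 0 then true
  else
    let text_lower := PySem.Str.lower text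
    let partial_lower := PySem.Str.lower partial_
    if PySem.Str.startswith text_lower partial_lower then true
    else if PySem.Str.isIn partial_lower text_lower then true
    else if (PySem.Str.split₀ text_lower).any
              (fun word => PySem.Str.startswith word partial_lower) then true
    else if PySem.Str.isIn "_" text_lower
            && ((PySem.Str.split? text_lower "_").getD []).any
              (fun part => PySem.Str.startswith part partial_lower) then true
    else if decide (3 ≤ PySem.Str.len partial_lower) then
      if PySem.Str.startswith text_lower (PySem.Str.slice partial_lower none (some 3)) then true
      else false
    else false

-- ===== PORT B =====
def flexible_match_py_alt (text : String) (partial_ : String) : Bool :=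
  let tl := PySem.Str.lower text
  let pl := PySem.Str.lower partial_
  PySem.Str.isIn pl tl
    || (decide (3 ≤ PySem.Str.len pl)
        && PySem.Str.startswith tl (PySem.Str.slice pl none (some 3)))

-- ===== PRECONDITION & SPEC =====
def Spec_flexible_match_py (text : String) (partial_ : String) (out : Bool) : Prop := out = flexible_match_py_alt text partial_
instance (text : String) (partial_ : String) (out : Bool) : Decidable (Spec_flexible_match_py text partial_ out) := by unfold Spec_flexible_match_py; infer_instance

-- ===== CLAIM (what is proved, stated in full; the proofs are below) =====
def Claim_equal_flexible_match_py : Prop := ∀ (text : String) (partial_ : String), Dom_flexible_match_py text partial_ → Spec_flexible_match_py text partial_ (flexible_match_py text partial_)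

-- ===== LEMMAS AND PROOFS =====

-- every piece produced by s.split() is an infix of s
theorem pv_split₀_go_infix (s : List Char) (cur : List Char) (acc : List (List Char)) (w : List Char)
    (hw : w ∈ PySem.Chars.split₀.go s cur acc) :
    w ∈ acc ∨ w <:+: cur.reverse ++ s := by
  induction s generalizing cur acc with
  | nil =>
    simp only [PySem.Chars.split₀.go] at hw
    by_cases hc : cur.isEmpty = true
    · simp [hc] at hw
      exact Or.inl hw
    · simp [hc] at hw
      rcases hw with h | h
      all_goals first
        | exact Or.inl h
        | exact Or.inr (by simp [h])
  | cons c rest ih =>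
    simp only [PySem.Chars.split₀.go] at hw
    by_cases hs : PySem.Chars.isspace c = true
    · simp only [hs, if_true] at hw
      by_cases hc : cur.isEmpty = true
      · simp only [hc, if_true] at hw
        rcases ih _ _ hw with h | h
        · exact Or.inl h
        · refine Or.inr (List.IsInfix.trans ?_ (((List.suffix_cons c rest).trans (List.suffix_append cur.reverse (c :: rest))).isInfix))
          simpa using h
      · simp only [hc] at hw
        rcases ih _ _ hw with h | h
        · rcases List.mem_cons.mp h with h' | h'
          · exact Or.inr (by subst h'; exact (List.prefix_append cur.reverse (c :: rest)).isInfix)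
          · exact Or.inl h'
        · refine Or.inr (h.trans ?_)
          simpa using ((List.suffix_cons c rest).trans (List.suffix_append cur.reverse (c :: rest))).isInfix
    · simp only [hs] at hw
      rcases ih _ _ hw with h | h
      · exact Or.inl h
      · refine Or.inr ?_
        simpa [List.append_assoc] using h

theorem pv_mem_split₀_infix (s w : List Char)
    (hw : w ∈ PySem.Chars.split₀ s) : w <:+: s := by
  have := pv_split₀_go_infix s [] [] w (by simpa [PySem.Chars.split₀] using hw)
  simpa using this

-- every piece produced by s.split(sep) is an infix of s
theorem pv_splitOn_go_infix (sep : List Char) (fuel : Nat) (l cur : List Char) (acc : List (List Char))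
    (w : List Char) (hw : w ∈ PySem.Chars.splitOn.go sep fuel l cur acc) :
    w ∈ acc ∨ w <:+: cur.reverse ++ l := by
  induction fuel generalizing l cur acc with
  | zero =>
    simp only [PySem.Chars.splitOn.go] at hw
    simp at hw
    rcases hw with h | h
    all_goals first
      | exact Or.inl h
      | exact Or.inr (by simp [h])
  | succ fuel ih =>
    cases l with
    | nil =>
      simp only [PySem.Chars.splitOn.go] at hw
      simp at hw
      rcases hw with h | h
      all_goals first
        | exact Or.inl h
        | exact Or.inr (by simp [h])
    | cons c rest =>
      simp only [PySem.Chars.splitOn.go] at hw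
      by_cases hpre : sep.isPrefixOf (c :: rest) = true
      · simp [hpre] at hw
        rcases ih _ _ _ hw with h | h
        · rcases List.mem_cons.mp h with h' | h'
          · exact Or.inr (by subst h'; exact (List.prefix_append cur.reverse (c :: rest)).isInfix)
          · exact Or.inl h'
        · refine Or.inr (by simpa using h.trans (((List.drop_suffix sep.length (c :: rest)).trans (List.suffix_append cur.reverse (c :: rest))).isInfix))
      · simp [hpre] at hw
        rcases ih _ _ _ hw with h | h
        · exact Or.inl h
        · refine Or.inr ?_
          simpa [List.append_assoc] using h

theorem pv_mem_splitOn_infix (s sep w : List Char)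
    (hw : w ∈ PySem.Chars.splitOn s sep) : w <:+: s := by
  have := pv_splitOn_go_infix sep (s.length + 1) s [] [] w (by simpa [PySem.Chars.splitOn] using hw)
  simpa using this

-- ===== VERDICT (by name: the statement is the Claim_ definition above) =====
theorem flexible_match_py_spec : Claim_equal_flexible_match_py := by
  intro text partial_ _
  show flexible_match_py text partial_ = flexible_match_py_alt text partial_
  unfold flexible_match_py flexible_match_py_alt
  set tl := PySem.Str.lower text with htl
  set pl := PySem.Str.lower partial_ with hpl
  by_cases hp : partial_ = ""
  · have hnil : pl.toList = [] := by
      simp [hpl, PySem.Str.toList_lower, PySem.Chars.lower, hp]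
    have hIn2 : PySem.Chars.isIn pl.toList tl.toList = true := by
      rw [hnil]; exact PySem.Chars.isIn_nil _
    simp [hp, hIn2, PySem.Str.len_eq]
  · by_cases hIn : PySem.Chars.isIn pl.toList tl.toList = true
    · simp [hp, hIn, PySem.Str.len_eq]
    · have hIn2 : PySem.Chars.isIn pl.toList tl.toList = false := by
        simpa using hIn
      have hNotInfix : ¬ pl.toList <:+: tl.toList := by
        intro h
        exact absurd ((PySem.Chars.isIn_iff_infix _ _).mpr h) (by simp [hIn2])
      have h1 : PySem.Chars.startswith tl.toList pl.toList = false := by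
        by_contra h
        exact hNotInfix ((PySem.Chars.startswith_iff _ _).mp ((Bool.not_eq_false _).mp h)).isInfix
      have e3 : ¬ ∃ w ∈ PySem.Str.split₀ tl, PySem.Chars.startswith w.toList pl.toList = true := by
        rintro ⟨w, hw, h⟩
        have hmem : w.toList ∈ PySem.Chars.split₀ tl.toList := by
          rw [← PySem.Str.split₀_map_toList]
          exact List.mem_map_of_mem hw
        exact hNotInfix (((PySem.Chars.startswith_iff _ _).mp h).isInfix.trans
          (pv_mem_split₀_infix _ _ hmem))
      have e4 : ¬ ∃ w ∈ (PySem.Str.split? tl "_").getD [],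
          PySem.Chars.startswith w.toList pl.toList = true := by
        rintro ⟨w, hw, h⟩
        have hsome : PySem.Str.split? tl "_"
            = some (List.map String.ofList (PySem.Chars.splitOn tl.toList "_".toList)) := by
          simp [PySem.Str.split?, PySem.Chars.split?]
        rw [hsome] at hw
        simp only [Option.getD_some, List.mem_map] at hw
        obtain ⟨v, hv, hveq⟩ := hw
        have hwl : w.toList = v := by subst hveq; simp
        exact hNotInfix (((PySem.Chars.startswith_iff _ _).mp h).isInfix.trans
          (hwl ▸ pv_mem_splitOn_infix _ _ _ hv))
      simp [hp, hIn2, h1, e3, e4, PySem.Str.len_eq]
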